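-- pv_equiv track=rewrite | github.com/Lidor115/KNN-Decision-Tree-and-Naive-Bayes | utils.py | make_examples
-- ===== SOURCE A (Python) =====
-- def make_examples(train_p):
--     """
--     create from the data a tupple of (date, label, index)
--     :param train_p: the parsed data
--     :return: tupple of (date, label, index) and all the attributes
--     """
--     attributes = {}
--     train_p_T = [[train_p[j][i] for j in range(len(train_p))] for i in range(len(train_p[0]))]
--     train_p_T.pop(-1)
--     for row in train_p_T:
--         attributes[row[0]] = set(row[1:])
--     train_p.pop(0)
--     index = 0
--     all_examples = []
--     for ex in train_p:
--         tag = ex[-1]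
--         label = False
--         if tag == 'yes':
--             label = True
--         index += 1
--         all_examples.append((ex[:-1], label, index))
--     return all_examples, attributes
-- ===== SOURCE B (Python) =====
-- def make_examples(train_p):
--     """
--     create from the data a tupple of (date, label, index)
--     :param train_p: the parsed data
--     :return: tupple of (date, label, index) and all the attributes
--     """
--     header = train_p[0]
--     attr_names = header[:-1]
--     col_sets = [set() for _ in attr_names]
--     for row in train_p[1:]:
--         for s, v in zip(col_sets, row):
--             s.add(v)
--     attributes = {}
--     for name, s in zip(attr_names, col_sets):
--         attributes[name] = s
--     train_p.pop(0)
--     all_examples = [(ex[:-1], ex[-1] == 'yes', i)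
--                     for i, ex in enumerate(train_p, 1)]
--     return all_examples, attributes
-- ===== Notes on version B (the rewrite author's own statement) =====
-- stated objective: simpler
-- what changed: B drops A's explicit transpose construction entirely: it keeps one set per attribute column and fills all of them in a single pass over the data rows (zip of sets with each row), then builds the attributes dict from header names, and builds the examples with enumerate instead of a manual index counter; like A it pops the header row off the caller's list.
-- outside the precondition, e.g. on make_examples([]): A raises IndexError, B raises IndexError
import Mathlib
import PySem

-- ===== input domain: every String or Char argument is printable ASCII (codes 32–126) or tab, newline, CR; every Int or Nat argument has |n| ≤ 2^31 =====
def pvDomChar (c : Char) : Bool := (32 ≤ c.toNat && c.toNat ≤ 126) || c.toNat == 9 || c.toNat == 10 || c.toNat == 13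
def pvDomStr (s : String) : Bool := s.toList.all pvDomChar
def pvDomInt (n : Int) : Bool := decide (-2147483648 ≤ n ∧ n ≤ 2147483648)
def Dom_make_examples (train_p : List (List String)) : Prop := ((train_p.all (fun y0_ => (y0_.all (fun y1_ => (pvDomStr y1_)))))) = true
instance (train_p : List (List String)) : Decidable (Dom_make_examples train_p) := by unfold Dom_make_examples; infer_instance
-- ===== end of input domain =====

-- B avoids A's transposed copy of the table: one pass over the data rows fills per-column sets.
-- Both Pythons mutate the caller's train_p identically (pop of the header row); the theorem is about the return value.

-- ===== PORT A =====
def make_examples (train_p : List (List String)) : (List (List String × Bool × Int)) × (List (String × List String)) :=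
  let row0 := (PySem.List.pyGet? train_p 0).getD []
  let train_p_T := (PySem.List.pyRange 0 (row0.length : Int) 1).map (fun i =>
      (PySem.List.pyRange 0 (train_p.length : Int) 1).map (fun j =>
        PySem.List.pyGetD (PySem.List.pyGetD train_p j []) i ""))
  -- train_p_T.pop(-1): none = IndexError on an empty list, excluded by Pre_
  let train_p_T := ((PySem.List.pop? train_p_T (-1)).map Prod.snd).getD train_p_T
  let attributes := train_p_T.foldl (fun (d : PySem.Dict String (List String)) row =>
      d.insert (PySem.List.pyGetD row 0 "")
               (PySem.Set.ofList (PySem.List.slice row (some 1) none))) PySem.Dict.empty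
  -- train_p.pop(0)
  let train_p := ((PySem.List.pop? train_p 0).map Prod.snd).getD train_p
  let res := train_p.foldl (fun (st : List (List String × Bool × Int) × Int) ex =>
      let tag := PySem.List.pyGetD ex (-1) ""
      let label := false
      let label := if tag == "yes" then true else label
      let index := st.2 + 1
      (st.1 ++ [(PySem.List.slice ex none (some (-1)), label, index)], index)) ([], 0)
  (res.1, attributes.items)

-- ===== PORT B =====
def make_examples_alt (train_p : List (List String)) : (List (List String × Bool × Int)) × (List (String × List String)) :=
  let header := (PySem.List.pyGet? train_p 0).getD []
  let attr_names := PySem.List.slice header none (some (-1))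
  let col_sets : List (PySem.Set String) := attr_names.map (fun _ => PySem.Set.empty)
  -- 'for s, v in zip(col_sets, row): s.add(v)' mutates the sets in place: the zipped prefix is
  -- updated, the sets past the end of row are kept unchanged (exact hand port of the zip loop)
  let col_sets := (PySem.List.slice train_p (some 1) none).foldl
      (fun cs row => List.zipWith PySem.Set.add cs row ++ cs.drop row.length) col_sets
  let attributes := (attr_names.zip col_sets).foldl
      (fun (d : PySem.Dict String (List String)) p => d.insert p.1 p.2) PySem.Dict.empty
  -- train_p.pop(0)
  let rest := ((PySem.List.pop? train_p 0).map Prod.snd).getD train_p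
  let all_examples := (PySem.List.enumerate rest 1).map
      (fun p => (PySem.List.slice p.2 none (some (-1)), PySem.List.pyGetD p.2 (-1) "" == "yes", p.1))
  (all_examples, attributes.items)

-- ===== PRECONDITION & SPEC =====
-- Pre_ is exactly where A returns: A raises IndexError on an empty table, on an empty header row
-- (train_p_T.pop(-1) on []), and when some row is shorter than the header (indexing in the transpose).
def Pre_make_examples (train_p : List (List String)) : Prop :=
  train_p ≠ [] ∧ train_p.headD [] ≠ [] ∧ ∀ row ∈ train_p, (train_p.headD []).length ≤ row.length
instance (train_p : List (List String)) : Decidable (Pre_make_examples train_p) := by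
  unfold Pre_make_examples; infer_instance

def pvWitness_make_examples : List (List String) :=
  [["a", "b", "cls"], ["1", "x", "yes"], ["2", "x", "no"]]

def Spec_make_examples (train_p : List (List String)) (out : (List (List String × Bool × Int)) × (List (String × List String))) : Prop := out = make_examples_alt train_p
instance (train_p : List (List String)) (out : (List (List String × Bool × Int)) × (List (String × List String))) : Decidable (Spec_make_examples train_p out) := by unfold Spec_make_examples; infer_instance

-- ===== CLAIM (what is proved, stated in full; the proofs are below) =====
def Claim_equal_make_examples : Prop := ∀ (train_p : List (List String)), Dom_make_examples train_p → Pre_make_examples train_p → Spec_make_examples train_p (make_examples train_p)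

-- ===== LEMMAS AND PROOFS =====

-- a list is the table of its own entries
theorem pv_self_eq_map_range {α : Type} (d : α) (cs : List α) :
    cs = (List.range cs.length).map (fun k => cs.getD k d) := by
  apply List.ext_getElem
  · simp
  · intro i h1 h2
    simp [List.getD_eq_getElem?_getD, h1]

-- B's row-major fold of zipWith Set.add, read column-wise
theorem pv_foldl_zipWith_eq (rows : List (List String)) :
    ∀ (cs : List (PySem.Set String)), (∀ row ∈ rows, cs.length ≤ row.length) →
    rows.foldl (fun cs row => List.zipWith PySem.Set.add cs row ++ cs.drop row.length) cs
      = (List.range cs.length).map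
          (fun k => rows.foldl (fun s r => PySem.Set.add s (r.getD k "")) (cs.getD k [])) := by
  induction rows with
  | nil => intro cs _; simpa using pv_self_eq_map_range [] cs
  | cons row rows ih =>
    intro cs h
    have hd0 : cs.drop row.length = [] := List.drop_eq_nil_of_le (h row (by simp))
    have hlen : (List.zipWith PySem.Set.add cs row ++ cs.drop row.length).length = cs.length := by
      simp [List.length_zipWith, hd0]
      exact h row (by simp)
    have h' : ∀ r ∈ rows, (List.zipWith PySem.Set.add cs row ++ cs.drop row.length).length ≤ r.length := by
      intro r hr; rw [hlen]; exact h r (by simp [hr])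
    rw [List.foldl_cons, ih _ h', hlen]
    apply List.map_congr_left
    intro k hk
    simp only [List.mem_range] at hk
    have hk' : k < row.length := lt_of_lt_of_le hk (h row (by simp))
    rw [List.foldl_cons]
    congr 1
    rw [hd0, List.append_nil,
      List.getD_eq_getElem?_getD, List.getElem?_eq_getElem (by simp [List.length_zipWith]; omega : k < (List.zipWith PySem.Set.add cs row).length)]
    simp [List.getElem_zipWith, List.getD_eq_getElem?_getD, List.getElem?_eq_getElem, hk, hk']

-- A's index-carrying append loop is a map over enumerate
theorem pv_foldl_index_eq_enumerate {α : Type} (G : List String → Int → α) (rows : List (List String)) :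
    ∀ (acc : List α) (idx : Int),
    (rows.foldl (fun (st : List α × Int) ex => (st.1 ++ [G ex (st.2 + 1)], st.2 + 1)) (acc, idx)).1
      = acc ++ (PySem.List.enumerate rows (idx + 1)).map (fun p => G p.2 p.1) := by
  induction rows with
  | nil => intro acc idx; simp [PySem.List.enumerate]
  | cons ex rows ih =>
    intro acc idx
    rw [List.foldl_cons, ih, PySem.List.enumerate_cons]
    simp

-- dropLast written as a table of entries
theorem pv_dropLast_eq_map_range (h : List String) (n : Nat) (hn : h.length = n + 1) :
    h.dropLast = (List.range n).map (fun k => h.getD k "") := by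
  apply List.ext_getElem
  · simp [hn]
  · intro i h1 h2
    simp only [List.length_dropLast, hn, Nat.add_sub_cancel] at h1
    simp [List.getElem_dropLast, List.getD_eq_getElem?_getD,
      List.getElem?_eq_getElem (by omega : i < h.length)]

-- ===== VERDICT (by name: the statement is the Claim_ definition above) =====
theorem make_examples_spec : Claim_equal_make_examples := by
  intro tp _ hpre
  obtain ⟨hne, hh, hlen⟩ := hpre
  cases tp with
  | nil => exact absurd rfl hne
  | cons hd rows =>
    simp only [List.headD_cons] at hh hlen
    obtain ⟨n, hn⟩ : ∃ n, hd.length = n + 1 :=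
      ⟨hd.length - 1, by have := List.length_pos_iff.mpr hh; omega⟩
    have hget : PySem.List.pyGet? (hd :: rows) 0 = some hd := by
      simp [PySem.List.pyGet?, PySem.List.pyIdx?]
    have hcol : ∀ x : Nat,
        (List.range (hd :: rows).length).map (fun j => ((hd :: rows).getD j []).getD x "")
          = (hd :: rows).map (fun r => r.getD x "") := by
      intro x
      apply List.ext_getElem
      · simp
      · intro i h1 h2
        simp only [List.length_map, List.length_range] at h1
        rw [List.getElem_map, List.getElem_map, List.getElem_range,
          List.getD_eq_getElem?_getD (l := hd :: rows) (i := i), List.getElem?_eq_getElem h1,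
          Option.getD_some]
    have hdl : hd.dropLast = (List.range n).map (fun k => hd.getD k "") :=
      pv_dropLast_eq_map_range hd n hn
    have hcs : ∀ k : Nat,
        (((List.range n).map (fun _ => (PySem.Set.empty : PySem.Set String))).getD k []) = [] := by
      intro k
      rw [List.getD_eq_getElem?_getD, List.getElem?_map]
      cases (List.range n)[k]? <;> simp [PySem.Set.empty]
    have hrowlen : ∀ row ∈ rows,
        ((List.range n).map (fun _ => (PySem.Set.empty : PySem.Set String))).length ≤ row.length := by
      intro row hr
      have := hlen row (by simp [hr])
      simp; omega
    unfold Spec_make_examples make_examples make_examples_alt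
    simp only [hget, Option.getD_some, PySem.List.pop?_zero_cons, Option.map_some,
      PySem.List.slice_from_one, List.tail_cons, PySem.List.slice_to_neg_one, hcol, hn,
      PySem.List.pyRange_zero_nat, List.map_map, Function.comp_def, PySem.List.pyGetD_natCast]
    rw [Prod.mk.injEq]
    refine ⟨?_, ?_⟩
    · -- the examples list
      rw [pv_foldl_index_eq_enumerate
        (fun ex i => (ex.dropLast, if (PySem.List.pyGetD ex (-1) "" == "yes") = true then true else false, i))
        rows [] 0]
      simp
      intro a b _
      rfl
    · -- the attributes dict
      congr 1
      rw [List.range_succ, List.map_append, List.map_singleton, PySem.List.pop?_last,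
        Option.map_some, Option.getD_some, List.foldl_map, hdl, List.map_map, Function.comp_def,
        pv_foldl_zipWith_eq rows _ (by simpa using hrowlen)]
      simp only [hcs, List.length_map, List.length_range, List.zip_map', List.foldl_map,
        List.map_cons, PySem.List.pyGetD_zero_cons, List.tail_cons, PySem.Set.ofList_eq_foldl]
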